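-- pv_equiv track=rewrite | github.com/primrose101/CS322 | dataTypeLexer.py | trueBool_lexer
-- ===== SOURCE A (Python) =====
-- def trueBool_lexer(string_input, index):
--     i = index
--
--     state_table = [[1,5,5,5,5],
--                    [5,2,5,5,5],
--                    [5,5,3,5,5],
--                    [5,5,5,4,5],
--                    [5,5,5,5,5],
--                    [5,5,5,5,5],]
--
--     state = 0
--     infut = 0
--
--     string_length = len(string_input)
--
--     while i != string_length:
--         if string_input[i] == 't':
--             infut = 0
--         elif string_input[i] == 'r':
--             infut = 1
--         elif string_input[i] == 'u':
--             infut = 2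
--         elif string_input[i] == 'e':
--             infut = 3
--         else:
--             infut = 4
--
--         state = state_table[state][infut]
--
--         if state == 5:
--             break
--
--         i += 1
--
--     return i
-- ===== SOURCE B (Python) =====
-- def trueBool_lexer(string_input, index):
--     i = index
--     n = len(string_input)
--     for ch in "true":
--         if i == n or string_input[i] != ch:
--             return i
--         i += 1
--     return i
-- ===== Notes on version B (the rewrite author's own statement) =====
-- stated objective: simpler
-- what changed: Replaced the 6x5 DFA state-transition table and the char-to-symbol-index if/elif chain with a direct loop over the target literal "true" that compares each expected character in turn and returns the current index on the first mismatch or at end of string.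
import Mathlib
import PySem

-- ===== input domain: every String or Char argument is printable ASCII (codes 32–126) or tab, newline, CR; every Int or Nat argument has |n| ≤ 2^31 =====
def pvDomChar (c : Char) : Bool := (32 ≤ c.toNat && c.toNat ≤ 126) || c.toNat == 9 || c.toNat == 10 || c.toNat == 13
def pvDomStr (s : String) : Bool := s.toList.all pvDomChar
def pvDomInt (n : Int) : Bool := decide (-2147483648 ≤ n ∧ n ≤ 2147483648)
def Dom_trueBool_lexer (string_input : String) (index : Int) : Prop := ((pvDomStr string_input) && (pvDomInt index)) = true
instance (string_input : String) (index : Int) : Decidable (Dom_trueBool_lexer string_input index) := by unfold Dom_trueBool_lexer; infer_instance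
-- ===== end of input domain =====

-- B replaces A's DFA state table and symbol-encoding chain by a direct comparison loop
-- over the literal "true"; objective: simpler, same return value wherever A returns.

-- ===== PORT A =====
-- A's state table, verbatim.
def pvStateTable : List (List Int) :=
  [[1,5,5,5,5],
   [5,2,5,5,5],
   [5,5,3,5,5],
   [5,5,5,4,5],
   [5,5,5,5,5],
   [5,5,5,5,5]]

-- A's if/elif chain computing the symbol index 'infut'.
def pvInfut (c : Char) : Int :=
  if c = 't' then 0
  else if c = 'r' then 1
  else if c = 'u' then 2
  else if c = 'e' then 3
  else 4

-- state_table[state][infut]; both indices are always in range in A's run.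
def pvTableGet (state infut : Int) : Int :=
  (PySem.List.pyGet? ((PySem.List.pyGet? pvStateTable state).getD []) infut).getD 5

-- A's while loop; fuel totalizes it ((len - i) shrinks by 1 per iteration and the loop
-- exits at i = len).  Where Python raises IndexError (pyGet? = none) the value is junk,
-- outside Pre_.
def pvALoop (s : List Char) (len : Int) (fuel : Nat) (i : Int) (state : Int) : Int :=
  match fuel with
  | 0 => i
  | fuel + 1 =>
    if i = len then i
    else
      match PySem.List.pyGet? s i with
      | none => i   -- Python raises IndexError here; excluded by Pre_
      | some c =>
        let state' := pvTableGet state (pvInfut c)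
        if state' = 5 then i else pvALoop s len fuel (i + 1) state'


def trueBool_lexer (string_input : String) (index : Int) : Int :=
  let s := string_input.toList
  let len : Int := s.length
  pvALoop s len (len - index).toNat index 0

-- ===== PORT B =====
-- B's for-loop over the literal "true": structural recursion on the remaining target chars.
def pvBLoop (s : List Char) (n : Int) (i : Int) : List Char → Int
  | [] => i
  | ch :: rest =>
    if i = n then i
    else
      match PySem.List.pyGet? s i with
      | none => i   -- Python raises IndexError here; excluded by Pre_
      | some c => if c ≠ ch then i else pvBLoop s n (i + 1) rest

def trueBool_lexer_alt (string_input : String) (index : Int) : Int :=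
  let s := string_input.toList
  pvBLoop s s.length index ['t', 'r', 'u', 'e']

-- ===== PRECONDITION & SPEC =====
-- A raises IndexError exactly when index > len(string_input) or index < -len(string_input);
-- Pre_ admits every input on which A returns.
def Pre_trueBool_lexer (string_input : String) (index : Int) : Prop :=
  -(string_input.toList.length : Int) ≤ index ∧ index ≤ (string_input.toList.length : Int)
instance (string_input : String) (index : Int) : Decidable (Pre_trueBool_lexer string_input index) := by unfold Pre_trueBool_lexer; infer_instance

def pvWitness_trueBool_lexer : String × Int := ("true or not", 0)

def Spec_trueBool_lexer (string_input : String) (index : Int) (out : Int) : Prop := out = trueBool_lexer_alt string_input index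
instance (string_input : String) (index : Int) (out : Int) : Decidable (Spec_trueBool_lexer string_input index out) := by unfold Spec_trueBool_lexer; infer_instance

-- ===== CLAIM (what is proved, stated in full; the proofs are below) =====
def Claim_equal_trueBool_lexer : Prop := ∀ (string_input : String) (index : Int), Dom_trueBool_lexer string_input index → Pre_trueBool_lexer string_input index → Spec_trueBool_lexer string_input index (trueBool_lexer string_input index)

-- ===== LEMMAS AND PROOFS =====

-- In range, pyGet? returns some character.
theorem pv_pyGet?_isSome (s : List Char) (i : Int)
    (h1 : -(s.length : Int) ≤ i) (h2 : i < (s.length : Int)) :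
    ∃ c, PySem.List.pyGet? s i = some c := by
  cases hc : PySem.List.pyGet? s i with
  | none =>
    rw [PySem.List.pyGet?_eq_none_iff] at hc
    exact absurd ⟨h1, h2⟩ hc
  | some c => exact ⟨c, rfl⟩

-- Rows of the table under the symbol encoding: diagonal advances, everything else is 5.
theorem pvRow0 (c : Char) : pvTableGet 0 (pvInfut c) = if c = 't' then 1 else 5 := by
  unfold pvInfut; split_ifs <;> first | decide | simp_all
theorem pvRow1 (c : Char) : pvTableGet 1 (pvInfut c) = if c = 'r' then 2 else 5 := by
  unfold pvInfut; split_ifs <;> first | decide | simp_all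
theorem pvRow2 (c : Char) : pvTableGet 2 (pvInfut c) = if c = 'u' then 3 else 5 := by
  unfold pvInfut; split_ifs <;> first | decide | simp_all
theorem pvRow3 (c : Char) : pvTableGet 3 (pvInfut c) = if c = 'e' then 4 else 5 := by
  unfold pvInfut; split_ifs <;> first | decide | simp_all
theorem pvRow4 (c : Char) : pvTableGet 4 (pvInfut c) = 5 := by
  unfold pvInfut; split_ifs <;> first | decide | simp_all

-- Core correspondence: A's loop in state k equals B's loop over the last (4-k)
-- characters of "true", for k = 0,…,4.
theorem pvLoop_eq (s : List Char) (fuel : Nat) :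
    ∀ (i : Int) (k : Nat), k ≤ 4 →
    fuel = ((s.length : Int) - i).toNat →
    -(s.length : Int) ≤ i → i ≤ (s.length : Int) →
    pvALoop s (s.length : Int) fuel i (k : Int) =
      pvBLoop s (s.length : Int) i (List.drop k ['t','r','u','e']) := by
  induction fuel with
  | zero =>
    intro i k hk hf h1 h2
    have : i = (s.length : Int) := by omega
    subst this
    interval_cases k <;> simp [pvALoop, pvBLoop]
  | succ fuel ih =>
    intro i k hk hf h1 h2
    by_cases hi : i = (s.length : Int)
    · subst hi
      interval_cases k <;> simp [pvALoop, pvBLoop]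
    · have hlt : i < (s.length : Int) := by omega
      obtain ⟨c, hc⟩ := pv_pyGet?_isSome s i h1 hlt
      have hf' : fuel = ((s.length : Int) - (i + 1)).toNat := by omega
      have ih' : ∀ k : Nat, k ≤ 4 →
          pvALoop s (s.length : Int) fuel (i + 1) (k : Int) =
            pvBLoop s (s.length : Int) (i + 1) (List.drop k ['t','r','u','e']) :=
        fun k hk => ih (i + 1) k hk hf' (by omega) (by omega)
      have key : ∀ (kn : Nat), kn < 4 →
          (if pvTableGet kn (pvInfut c) = 5 then i
           else pvALoop s (s.length : Int) fuel (i + 1) (pvTableGet kn (pvInfut c))) =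
            pvBLoop s (s.length : Int) i (List.drop kn ['t','r','u','e']) := by
        intro kn hkn
        interval_cases kn
        · push_cast
          rw [pvRow0]
          by_cases hcc : c = 't'
          · rw [if_pos hcc, List.drop, pvBLoop, if_neg hi, hc]
            simp only [hcc, ne_eq, not_true_eq_false, if_false]
            exact_mod_cast ih' 1 (by omega)
          · rw [if_neg hcc, List.drop, pvBLoop, if_neg hi, hc]
            simp [hcc]
        · push_cast
          rw [pvRow1]
          by_cases hcc : c = 'r'
          · rw [if_pos hcc, List.drop, List.drop, pvBLoop, if_neg hi, hc]
            simp only [hcc, ne_eq, not_true_eq_false, if_false]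
            exact_mod_cast ih' 2 (by omega)
          · rw [if_neg hcc, List.drop, List.drop, pvBLoop, if_neg hi, hc]
            simp [hcc]
        · push_cast
          rw [pvRow2]
          by_cases hcc : c = 'u'
          · rw [if_pos hcc, List.drop, List.drop, List.drop, pvBLoop, if_neg hi, hc]
            simp only [hcc, ne_eq, not_true_eq_false, if_false]
            exact_mod_cast ih' 3 (by omega)
          · rw [if_neg hcc, List.drop, List.drop, List.drop, pvBLoop, if_neg hi, hc]
            simp [hcc]
        · push_cast
          rw [pvRow3]
          by_cases hcc : c = 'e'
          · rw [if_pos hcc, show List.drop 3 ['t','r','u','e'] = ['e'] from rfl, pvBLoop, if_neg hi, hc]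
            simp only [hcc, ne_eq, not_true_eq_false, if_false]
            exact_mod_cast ih' 4 (by omega)
          · rw [if_neg hcc, show List.drop 3 ['t','r','u','e'] = ['e'] from rfl, pvBLoop, if_neg hi, hc]
            simp [hcc]
      interval_cases k
      · rw [pvALoop]; rw [if_neg hi, hc]
        exact_mod_cast key 0 (by omega)
      · rw [pvALoop]; rw [if_neg hi, hc]
        exact_mod_cast key 1 (by omega)
      · rw [pvALoop]; rw [if_neg hi, hc]
        exact_mod_cast key 2 (by omega)
      · rw [pvALoop]; rw [if_neg hi, hc]
        exact_mod_cast key 3 (by omega)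
      · rw [pvALoop]; rw [if_neg hi, hc]
        push_cast
        rw [pvRow4]
        simp [pvBLoop]

-- ===== VERDICT (by name: the statement is the Claim_ definition above) =====
theorem trueBool_lexer_spec : Claim_equal_trueBool_lexer := by
  intro string_input index _ hpre
  unfold Spec_trueBool_lexer trueBool_lexer trueBool_lexer_alt
  simpa using pvLoop_eq string_input.toList _ index 0 (by omega) rfl hpre.1 hpre.2
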